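-- pv_equiv track=rewrite | github.com/pc5401/my_BOJ | 백준/Gold/2313. 보석 구매하기/보석 구매하기.py | solve_row
-- ===== SOURCE A (Python) =====
-- import bisect
--
-- def solve_row(values: list[int]) -> tuple[int,int,int]:
--     L = len(values)
--     max_ending = values[0]
--     S = values[0]
--     for x in values[1:]:
--         max_ending = max(x, max_ending + x)
--         S = max(S, max_ending)
--
--     ps = [0]*(L+1)
--     for i in range(1, L+1):
--         ps[i] = ps[i-1] + values[i-1]
--     d = {}
--     for idx, val in enumerate(ps):
--         d.setdefault(val, []).append(idx)
--     best_len = L+1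
--     best_start = L+1
--     for j in range(1, L+1):
--         target = ps[j] - S
--         if target in d:
--             lst = d[target]
--             # i < j
--             pos = bisect.bisect_left(lst, j) - 1
--             if pos >= 0:
--                 i = lst[pos]
--                 length = j - i
--                 start = i + 1
--                 if length < best_len or (length == best_len and start < best_start):
--                     best_len = length
--                     best_start = start
--
--     end = best_start + best_len - 1
--     return S, best_start, end
-- ===== SOURCE B (Python) =====
-- def solve_row(values: list[int]) -> tuple[int, int, int]:
--     L = len(values)
--     # pass 1: max subarray sum via prefix sums and a running prefix minimum
--     S = values[0]
--     ps = 0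
--     mn = 0
--     for x in values:
--         ps += x
--         if ps - mn > S:
--             S = ps - mn
--         if ps < mn:
--             mn = ps
--     # pass 2: shortest subarray with sum S, via last-seen prefix-sum index
--     last = {0: 0}
--     ps = 0
--     best_len = L + 1
--     best_start = L + 1
--     for j, x in enumerate(values, 1):
--         ps += x
--         t = ps - S
--         if t in last:
--             i = last[t]
--             length = j - i
--             start = i + 1
--             if length < best_len or (length == best_len and start < best_start):
--                 best_len = length
--                 best_start = start
--         last[ps] = j
--     return S, best_start, best_start + best_len - 1
-- ===== Notes on version B (the rewrite author's own statement) =====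
-- stated objective: faster
-- what changed: Replaces A's per-value sorted index lists with bisect lookups (and its Kadane recurrence) by a single pass that stores only the last-seen index of each prefix sum in a dict (max subarray sum from a running prefix minimum), removing the O(log L) bisect per position.
import Mathlib
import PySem

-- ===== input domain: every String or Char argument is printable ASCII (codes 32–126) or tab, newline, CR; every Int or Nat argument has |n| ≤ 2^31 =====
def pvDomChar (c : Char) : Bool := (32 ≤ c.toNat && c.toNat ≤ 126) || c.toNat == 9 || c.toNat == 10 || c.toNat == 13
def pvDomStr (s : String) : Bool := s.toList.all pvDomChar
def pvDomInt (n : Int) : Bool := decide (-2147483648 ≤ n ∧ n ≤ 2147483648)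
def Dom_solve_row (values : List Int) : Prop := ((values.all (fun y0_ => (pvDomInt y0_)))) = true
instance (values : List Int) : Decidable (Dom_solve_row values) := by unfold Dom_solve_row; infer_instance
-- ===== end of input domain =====

-- B replaces A's sorted index lists + bisect lookup by a single pass keeping the last-seen
-- index of each prefix sum in a dict (and computes the maximum subarray sum from a running
-- prefix minimum instead of Kadane's recurrence): O(L) instead of O(L log L).

-- ===== PORT A =====
def solve_row (values : List Int) : Int × Int × Int :=
  let L : Int := values.length
  -- values[0] raises IndexError on []; Pre_solve_row excludes [], so headD is exact here
  let v0 := values.headD 0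
  let ks := (values.drop 1).foldl (fun (p : Int × Int) x =>
      let me := max x (p.1 + x); (me, max p.2 me)) (v0, v0)
  let S := ks.2
  -- ps[i] = ps[i-1] + values[i-1] built left to right from ps[0] = 0
  let ps : List Int := values.foldl (fun acc x => acc ++ [acc.getLast?.getD 0 + x]) [0]
  -- d.setdefault(val, []).append(idx)  =  modify val [] (· ++ [idx])
  let d : PySem.Dict Int (List Int) := (PySem.List.enumerate ps).foldl
      (fun d p => d.modify p.2 [] (fun l => l ++ [p.1])) PySem.Dict.empty
  let bb := (PySem.List.pyRange 1 (L + 1)).foldl (fun (st : Int × Int) j =>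
      let target := PySem.List.pyGetD ps j 0 - S   -- ps[j]: 1 ≤ j ≤ L is always in range
      if d.contains target then
        let lst := d.getD target []
        let pos : Int := (PySem.List.bisectLeft lst j : Int) - 1
        if 0 ≤ pos then
          let i := PySem.List.pyGetD lst pos 0     -- 0 ≤ pos < len(lst), always in range
          let length := j - i
          let start := i + 1
          if length < st.1 ∨ (length = st.1 ∧ start < st.2) then (length, start) else st
        else st
      else st) (L + 1, L + 1)
  (S, bb.2, bb.2 + bb.1 - 1)

-- ===== PORT B =====
def solve_row_alt (values : List Int) : Int × Int × Int :=
  let L : Int := values.length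
  -- pass 1: S = max subarray sum, from running prefix sum and running prefix minimum
  -- (values[0] raises IndexError on []; Pre_solve_row excludes [], so headD is exact)
  let st1 := values.foldl (fun (p : Int × Int × Int) x =>
      let ps := p.1 + x
      let S := if ps - p.2.1 > p.2.2 then ps - p.2.1 else p.2.2
      let mn := if ps < p.2.1 then ps else p.2.1
      (ps, mn, S)) (0, 0, values.headD 0)
  let S := st1.2.2
  -- pass 2: shortest subarray with sum S; dict maps prefix sum to its last-seen index,
  -- (best_len, best_start) kept as the pair q.2.2
  let st2 := (PySem.List.enumerate values 1).foldl
      (fun (q : PySem.Dict Int Int × Int × (Int × Int)) jx =>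
        let j := jx.1
        let ps := q.2.1 + jx.2
        let bb := match q.1.get? (ps - S) with
          | some i =>
            let length := j - i
            let start := i + 1
            if length < q.2.2.1 ∨ (length = q.2.2.1 ∧ start < q.2.2.2) then (length, start)
            else q.2.2
          | none => q.2.2
        (q.1.insert ps j, ps, bb))
      (PySem.Dict.ofList [(0, 0)], 0, (L + 1, L + 1))
  (S, st2.2.2.2, st2.2.2.2 + st2.2.2.1 - 1)

-- ===== PRECONDITION & SPEC =====
-- Pre_ excludes only the empty list, on which A raises IndexError (values[0]).
def Pre_solve_row (values : List Int) : Prop := values ≠ []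
instance (values : List Int) : Decidable (Pre_solve_row values) := by unfold Pre_solve_row; infer_instance
def pvWitness_solve_row : List Int := [1, -2, 3]
def Spec_solve_row (values : List Int) (out : Int × Int × Int) : Prop := out = solve_row_alt values
instance (values : List Int) (out : Int × Int × Int) : Decidable (Spec_solve_row values out) := by unfold Spec_solve_row; infer_instance

-- ===== CLAIM (what is proved, stated in full; the proofs are below) =====
def Claim_equal_solve_row : Prop := ∀ (values : List Int), Dom_solve_row values → Pre_solve_row values → Spec_solve_row values (solve_row values)

-- ===== LEMMAS AND PROOFS =====

-- prefix sums as a scanl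
def psl (values : List Int) : List Int := values.scanl (· + ·) 0

-- the candidate start index (0-based, as Python int) for right end j: the largest i < j
-- with ps[i] = ps[j] - S
def cand (ps : List Int) (tgt : Int) (j : Nat) : Option Int :=
  (((List.range j).filter (fun i => ps.getD i 0 = tgt)).map
    (fun i : Nat => (i : Int))).getLast?

-- the common reference body of both shortest-subarray loops
def rstep (ps : List Int) (S : Int) (st : Int × Int) (j : Nat) : Int × Int :=
  match cand ps (ps.getD j 0 - S) j with
  | some i =>
      let len := (j : Int) - i
      let s := i + 1
      if len < st.1 ∨ (len = st.1 ∧ s < st.2) then (len, s) else st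
  | none => st


-- ---- generic library-style facts about the specific loops of the two ports ----

-- A's ps-building loop is scanl
theorem foldl_ps (l acc : List Int) (a : Int) :
    l.foldl (fun acc x => acc ++ [acc.getLast?.getD 0 + x]) (acc ++ [a])
      = acc ++ l.scanl (· + ·) a := by
  induction l generalizing acc a with
  | nil => simp [List.scanl]
  | cons x xs ih =>
    simp only [List.foldl_cons, List.scanl]
    rw [List.getLast?_concat]
    have := ih (acc ++ [a]) (a + x)
    simpa [List.append_assoc] using this

-- A's Kadane recurrence equals B's prefix-minimum recurrence
theorem kadane_eq (l : List Int) (me s ps mn S : Int)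
    (hs : s = S) (hmn : mn = min (ps - me) ps) :
    (l.foldl (fun (p : Int × Int) x =>
        let m := max x (p.1 + x); (m, max p.2 m)) (me, s)).2
    = (l.foldl (fun (p : Int × Int × Int) x =>
        let q := p.1 + x
        let T := if q - p.2.1 > p.2.2 then q - p.2.1 else p.2.2
        let m := if q < p.2.1 then q else p.2.1
        (q, m, T)) (ps, mn, S)).2.2 := by
  induction l generalizing me s ps mn S with
  | nil => simpa using hs
  | cons x xs ih =>
    simp only [List.foldl_cons]
    exact ih _ _ _ _ _ (by omega) (by omega)

theorem pyRange_natCast (a n : Nat) :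
    PySem.List.pyRange (a : Int) ((a + n : Nat) : Int)
      = (List.range' a n).map (fun i : Nat => (i : Int)) := by
  induction n generalizing a with
  | zero => simp [PySem.List.pyRange]
  | succ n ih =>
    rw [PySem.List.pyRange_one_cons (by push_cast; omega), List.range'_succ]
    have h1 : ((a : Int) + 1) = ((a + 1 : Nat) : Int) := by push_cast; ring
    rw [h1]
    have h2 : ((a + (n+1) : Nat) : Int) = (((a+1) + n : Nat) : Int) := by push_cast; ring
    rw [h2, ih (a+1)]
    simp

theorem scanl_getD (l : List Int) (a : Int) (i : Nat) (hi : i ≤ l.length) :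
    (l.scanl (· + ·) a).getD i 0 = a + (l.take i).sum := by
  induction l generalizing a i with
  | nil =>
    have : i = 0 := by simpa using hi
    simp [this, List.scanl_nil]
  | cons x xs ih =>
    cases i with
    | zero => simp [List.scanl_cons]
    | succ i =>
      simp only [List.scanl_cons, List.getD_cons_succ, List.take_succ_cons, List.sum_cons]
      rw [ih (a + x) i (by simpa using hi)]
      ring

-- A's grouping dict: its stored lists
theorem groupD_getD (l : List (Int × Int)) (v : Int) :
    ((l.foldl (fun d p => d.modify p.2 [] (fun t => t ++ [p.1]))
        (PySem.Dict.empty : PySem.Dict Int (List Int))).getD v [])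
      = (l.filter (fun p => p.2 == v)).map (·.1) := by
  have h : l.foldl (fun d p => d.modify p.2 [] (fun t => t ++ [p.1]))
        (PySem.Dict.empty : PySem.Dict Int (List Int))
      = (l.map Prod.swap).foldl (fun d p => d.modify p.1 [] (fun t => t ++ [p.2]))
        PySem.Dict.empty := by
    rw [List.foldl_map]
    rfl
  rw [h, PySem.Dict.getD_foldl_modify_append]
  simp [List.filter_map, Function.comp_def, Prod.swap]

-- the grouping list over `enumerate ps` is an index filter over `range`
theorem lst_char (ps : List Int) (v : Int) :
    ((PySem.List.enumerate ps).filter (fun p => p.2 == v)).map (·.1)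
      = ((List.range ps.length).filter (fun i => ps.getD i 0 = v)).map
          (fun i : Nat => (i : Int)) := by
  rw [PySem.List.enumerate_eq_map_pyRange ps 0]
  have h0 : PySem.List.pyRange 0 (PySem.List.len ps)
      = (List.range ps.length).map (fun i : Nat => (i : Int)) := by
    have := pyRange_natCast 0 ps.length
    simpa [PySem.List.len, List.range_eq_range'] using this
  rw [h0, List.map_map, List.filter_map, List.map_map]
  simp only [Function.comp_def, PySem.List.pyGetD_natCast]
  congr 1

theorem filter_range_split (n j : Nat) (hj : j ≤ n) (p : Nat → Bool) :
    (List.range n).filter p = (List.range j).filter p ++ (List.range' j (n - j)).filter p := by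
  rw [← List.filter_append, List.range_eq_range', List.range_eq_range']
  have h := @List.range'_append 0 j (n - j) 1
  simp only [one_mul, Nat.zero_add] at h
  rw [h]
  congr 2
  omega

-- bisectLeft on a sorted concatenation, all of A below x, all of B at or above x
theorem bisectLeft_split (A B : List Int) (x : Int)
    (hA : ∀ a ∈ A, a < x) (hB : ∀ b ∈ B, x ≤ b) (hs : (A ++ B).Pairwise (· ≤ ·)) :
    PySem.List.bisectLeft (A ++ B) x = A.length := by
  obtain ⟨hk1, hk2, hk3⟩ := PySem.List.bisectLeft_spec (A ++ B) x hs
  set k := PySem.List.bisectLeft (A ++ B) x with hk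
  have hlen : (A ++ B).length = A.length + B.length := List.length_append
  rcases lt_trichotomy k A.length with h | h | h
  · exfalso
    have h3 := hk3 k (by omega) (le_refl _)
    rw [List.getElem_append_left h] at h3
    exact absurd h3 (not_le.mpr (hA _ (List.getElem_mem h)))
  · exact h
  · exfalso
    have hlt : A.length < (A ++ B).length := by omega
    have h2 := hk2 A.length hlt h
    rw [List.getElem_append_right (le_refl _)] at h2
    exact absurd h2 (not_lt.mpr (hB _ (List.getElem_mem _)))

theorem bisect_eq (n j : Nat) (hj : j ≤ n) (p : Nat → Bool) :
    PySem.List.bisectLeft (((List.range n).filter p).map (fun i : Nat => (i : Int))) ((j : Nat) : Int)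
      = ((List.range j).filter p).length := by
  rw [filter_range_split n j hj p, List.map_append]
  rw [show (((List.range j).filter p).length)
      = (((List.range j).filter p).map (fun i : Nat => (i:Int))).length by simp]
  apply bisectLeft_split
  · intro a ha
    obtain ⟨b, hb, rfl⟩ := List.mem_map.mp ha
    have : b < j := by simpa using (List.mem_filter.mp hb).1
    exact_mod_cast this
  · intro b hb
    obtain ⟨c, hc, rfl⟩ := List.mem_map.mp hb
    obtain ⟨i, hi, rfl⟩ := List.mem_range'.mp (List.mem_filter.mp hc).1
    have : j ≤ j + 1 * i := by omega
    exact_mod_cast this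
  · rw [← List.map_append, ← filter_range_split n j hj p]
    exact List.Pairwise.map _ (fun a b (hab : a < b) => by exact_mod_cast hab.le)
      ((List.pairwise_lt_range).sublist List.filter_sublist)

-- ---- the two shortest-subarray loops both compute `rstep` ----

theorem rstep_none (ps : List Int) (S : Int) (st : Int × Int) (j : Nat)
    (h : cand ps (ps.getD j 0 - S) j = none) : rstep ps S st j = st := by
  simp only [rstep, h]

theorem rstep_some (ps : List Int) (S : Int) (st : Int × Int) (j : Nat) (i : Int)
    (h : cand ps (ps.getD j 0 - S) j = some i) :
    rstep ps S st j
      = if (j : Int) - i < st.1 ∨ ((j : Int) - i = st.1 ∧ i + 1 < st.2)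
        then ((j : Int) - i, i + 1) else st := by
  simp only [rstep, h]

-- per-index body of A's j-loop
theorem bodyA_eq (ps : List Int) (S : Int) (L j : Nat) (hL : ps.length = L + 1)
    (_h1 : 1 ≤ j) (h2 : j ≤ L) (st : Int × Int) :
    (let target := PySem.List.pyGetD ps ((j : Nat) : Int) 0 - S
     let d := (PySem.List.enumerate ps).foldl
        (fun d p => d.modify p.2 [] (fun l => l ++ [p.1])) PySem.Dict.empty
     if d.contains target then
       let lst := d.getD target []
       let pos : Int := (PySem.List.bisectLeft lst ((j : Nat) : Int) : Int) - 1
       if 0 ≤ pos then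
         let i := PySem.List.pyGetD lst pos 0
         let length := ((j : Nat) : Int) - i
         let start := i + 1
         if length < st.1 ∨ (length = st.1 ∧ start < st.2) then (length, start) else st
       else st
     else st)
    = rstep ps S st j := by
  simp only [PySem.List.pyGetD_natCast]
  set d := (PySem.List.enumerate ps).foldl
      (fun d p => d.modify p.2 [] (fun l => l ++ [p.1])) PySem.Dict.empty with hd
  set tgt := ps.getD j 0 - S with htgt
  have hgetD : d.getD tgt []
      = ((List.range (L+1)).filter (fun i => decide (ps.getD i 0 = tgt))).map
          (fun i : Nat => (i : Int)) := by
    rw [hd, groupD_getD, lst_char, hL]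
  by_cases hc : d.contains tgt
  · rw [if_pos hc]
    rw [hgetD, bisect_eq (L+1) j (by omega) _]
    set Fj := (List.range j).filter (fun i => decide (ps.getD i 0 = tgt)) with hFj
    rcases Nat.eq_zero_or_pos Fj.length with hm | hm
    · have hneg : ¬ (0 : Int) ≤ (Fj.length : Int) - 1 := by omega
      simp only [hneg, if_false]
      have hnil : Fj = [] := List.length_eq_zero_iff.mp hm
      rw [rstep_none ps S st j (by rw [cand, ← hFj, hnil]; rfl)]
    · have hge : (0 : Int) ≤ (Fj.length : Int) - 1 := by omega
      simp only [hge, if_true]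
      have hcast : (Fj.length : Int) - 1 = ((Fj.length - 1 : Nat) : Int) := by omega
      rw [hcast, PySem.List.pyGetD_natCast]
      have hsplitmap : ((List.range (L+1)).filter (fun i => decide (ps.getD i 0 = tgt))).map
            (fun i : Nat => (i : Int))
          = Fj.map (fun i : Nat => (i : Int))
            ++ ((List.range' j (L+1-j)).filter (fun i => decide (ps.getD i 0 = tgt))).map
                (fun i : Nat => (i : Int)) := by
        rw [filter_range_split (L+1) j (by omega) _, List.map_append]
      rw [hsplitmap]
      have hlt : Fj.length - 1 < (Fj.map (fun i : Nat => (i : Int))).length := by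
        simp only [List.length_map]; omega
      have hgd : (Fj.map (fun i : Nat => (i : Int))
            ++ ((List.range' j (L+1-j)).filter (fun i => decide (ps.getD i 0 = tgt))).map
                (fun i : Nat => (i : Int))).getD (Fj.length - 1) 0
          = ((Fj[Fj.length - 1]'(by omega) : Nat) : Int) := by
        rw [List.getD_eq_getElem?_getD, List.getElem?_append_left hlt]
        simp [List.getElem?_eq_getElem (by omega : Fj.length - 1 < Fj.length)]
      rw [hgd]
      have hcand : cand ps tgt j = some ((Fj[Fj.length - 1]'(by omega) : Nat) : Int) := by
        rw [cand, ← hFj, List.getLast?_eq_getElem?]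
        simp [List.getElem?_eq_getElem
          (by simp only [List.length_map]; omega
            : Fj.length - 1 < (Fj.map (fun i : Nat => (i : Int))).length)]
      rw [rstep_some ps S st j _ (htgt ▸ hcand)]
  · rw [if_neg hc]
    have hnone : d.get? tgt = none := (PySem.Dict.get?_eq_none_iff_contains d tgt).mpr
      (by simpa using hc)
    have hempty : ((List.range (L+1)).filter (fun i => decide (ps.getD i 0 = tgt))).map
        (fun i : Nat => (i : Int)) = [] := by
      rw [← hgetD, PySem.Dict.getD_eq_get?_getD, hnone]
      rfl
    have hF : (List.range (L+1)).filter (fun i => decide (ps.getD i 0 = tgt)) = [] := by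
      simpa using hempty
    have hFj : (List.range j).filter (fun i => decide (ps.getD i 0 = tgt)) = [] := by
      have hsp := filter_range_split (L+1) j (by omega) (fun i => decide (ps.getD i 0 = tgt))
      rw [hF] at hsp
      exact (List.append_eq_nil_iff.mp hsp.symm).1
    rw [rstep_none ps S st j (by rw [cand, hFj]; rfl)]

-- A's whole j-loop is the reference loop
theorem Aloop_eq (ps : List Int) (S : Int) (L : Nat) (hL : ps.length = L + 1)
    (st0 : Int × Int) :
    (PySem.List.pyRange 1 ((L : Int) + 1)).foldl (fun (st : Int × Int) j =>
      let target := PySem.List.pyGetD ps j 0 - S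
      let d := (PySem.List.enumerate ps).foldl
          (fun d p => d.modify p.2 [] (fun l => l ++ [p.1])) PySem.Dict.empty
      if d.contains target then
        let lst := d.getD target []
        let pos : Int := (PySem.List.bisectLeft lst j : Int) - 1
        if 0 ≤ pos then
          let i := PySem.List.pyGetD lst pos 0
          let length := j - i
          let start := i + 1
          if length < st.1 ∨ (length = st.1 ∧ start < st.2) then (length, start) else st
        else st
      else st) st0
    = (List.range' 1 L).foldl (rstep ps S) st0 := by
  have hr : PySem.List.pyRange 1 ((L : Int) + 1)
      = (List.range' 1 L).map (fun i : Nat => (i : Int)) := by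
    have h := pyRange_natCast 1 L
    have e1 : (((1 : Nat)) : Int) = 1 := by norm_num
    have e2 : (((1 + L : Nat)) : Int) = (L : Int) + 1 := by push_cast; ring
    rw [e1, e2] at h
    exact h
  rw [hr, List.foldl_map]
  apply PySem.List.foldl_congr_mem
  intro acc x hx
  obtain ⟨h1, h2⟩ := List.mem_range'.mp hx
  exact bodyA_eq ps S L x hL (by omega) (by omega) acc

-- B's loop invariant: the dict holds the last-seen index of every prefix-sum value
theorem Bloop_eq (values : List Int) (S : Int) (tail : List Int) (t : Nat)
    (j0 p0 : Int) (last : PySem.Dict Int Int) (st : Int × Int)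
    (htail : tail = values.drop t)
    (hj0 : j0 = ((t : Nat) : Int) + 1)
    (hp0 : p0 = (psl values).getD t 0)
    (hinv : ∀ v : Int, last.get? v
      = (((List.range (t+1)).filter (fun i => (psl values).getD i 0 = v)).map
          (fun i : Nat => (i : Int))).getLast?) :
    ((PySem.List.enumerate tail j0).foldl
      (fun (q : PySem.Dict Int Int × Int × (Int × Int)) jx =>
        let j := jx.1
        let ps := q.2.1 + jx.2
        let bb := match q.1.get? (ps - S) with
          | some i =>
            let length := j - i
            let start := i + 1
            if length < q.2.2.1 ∨ (length = q.2.2.1 ∧ start < q.2.2.2) then (length, start)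
            else q.2.2
          | none => q.2.2
        (q.1.insert ps j, ps, bb))
      (last, p0, st)).2.2
    = (List.range' (t+1) (values.length - t)).foldl (rstep (psl values) S) st := by
  induction tail generalizing t j0 p0 last st with
  | nil =>
    have ht : values.length ≤ t := by
      by_contra hlt
      exact absurd htail.symm (List.drop_eq_nil_iff.not.mpr (by omega))
    rw [PySem.List.enumerate_nil]
    simp [Nat.sub_eq_zero_of_le ht]
  | cons x tl ih =>
    have htlen : t < values.length := by
      by_contra hge
      rw [List.drop_eq_nil_iff.mpr (by omega)] at htail
      exact List.cons_ne_nil _ _ htail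
    have hx : values[t]? = some x := by
      rw [← List.head?_drop, ← htail]
      rfl
    have htl : tl = values.drop (t+1) := by
      rw [← List.tail_drop, ← htail]
      rfl
    have hpsum : p0 + x = (psl values).getD (t+1) 0 := by
      rw [hp0, psl, scanl_getD values 0 t (by omega), scanl_getD values 0 (t+1) (by omega)]
      rw [List.sum_take_succ values t htlen]
      rw [List.getElem?_eq_getElem htlen] at hx
      rw [Option.some.inj hx]
      ring
    have hcand : last.get? (p0 + x - S)
        = cand (psl values) ((psl values).getD (t+1) 0 - S) (t+1) := by
      rw [hpsum, hinv]
      rfl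
    have hmatch : (match last.get? (p0 + x - S) with
        | some i => if j0 - i < st.1 ∨ (j0 - i = st.1 ∧ i + 1 < st.2)
            then (j0 - i, i + 1) else st
        | none => st)
        = rstep (psl values) S st (t+1) := by
      rw [hcand]
      rcases h : cand (psl values) ((psl values).getD (t+1) 0 - S) (t+1) with _ | i
      · rw [rstep_none _ _ _ _ h]
      · rw [rstep_some _ _ _ _ _ h]
        have he : ((((t + 1 : Nat)) : Int)) = j0 := by rw [hj0]; push_cast; ring
        rw [he]
    have hq : ∀ v : Int, (last.insert (p0 + x) j0).get? v
        = (((List.range (t+1+1)).filter (fun i => (psl values).getD i 0 = v)).map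
            (fun i : Nat => (i : Int))).getLast? := by
      intro v
      rw [List.range_succ, List.filter_append, List.map_append]
      by_cases hv : (psl values).getD (t+1) 0 = v
      · rw [hpsum, hv, PySem.Dict.get?_insert_self]
        have hv' : ((psl values)[t+1]?.getD 0 = v) := hv
        have hone : (List.filter (fun i => decide ((psl values).getD i 0 = v)) [t+1])
            = [t+1] := by simp [List.getD, hv']
        rw [hone, hj0]
        simp
      · rw [hpsum, PySem.Dict.get?_insert_of_ne _ _ (by simpa using (Ne.symm hv))]
        have hv' : ¬ ((psl values)[t+1]?.getD 0 = v) := hv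
        have hzero : (List.filter (fun i => decide ((psl values).getD i 0 = v)) [t+1])
            = [] := by simp [List.getD, hv']
        rw [hzero]
        simp [hinv v]
    rw [PySem.List.enumerate_cons, List.foldl_cons]
    have hrange : List.range' (t+1) (values.length - t)
        = (t+1) :: List.range' (t+1+1) (values.length - (t+1)) := by
      rw [show values.length - t = (values.length - (t+1)) + 1 by omega, List.range'_succ]
    rw [hrange, List.foldl_cons]
    have ih' := ih (t+1) (j0 + 1) (p0 + x) (last.insert (p0 + x) j0)
      (rstep (psl values) S st (t+1)) htl (by rw [hj0]; push_cast; ring)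
      (by rw [hpsum]) hq
    refine Eq.trans ?_ ih'
    congr 3
    show (last.insert (p0 + x) j0, p0 + x,
        (match last.get? (p0 + x - S) with
          | some i => if j0 - i < st.1 ∨ (j0 - i = st.1 ∧ i + 1 < st.2)
              then (j0 - i, i + 1) else st
          | none => st))
      = (last.insert (p0 + x) j0, p0 + x, rstep (psl values) S st (t+1))
    rw [hmatch]

-- the initial dict {0: 0} satisfies B's invariant at t = 0
theorem inv0 (values : List Int) :
    ∀ v : Int, (PySem.Dict.ofList [((0 : Int), (0 : Int))]).get? v
      = (((List.range (0+1)).filter (fun i => (psl values).getD i 0 = v)).map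
          (fun i : Nat => (i : Int))).getLast? := by
  intro v
  have h0 : (psl values).getD 0 0 = 0 := by
    cases values with
    | nil => simp [psl]
    | cons a l => simp [psl, List.scanl_cons]
  have hof : (PySem.Dict.ofList [((0 : Int), (0 : Int))]).get? v
      = if v = 0 then some 0 else none := by
    simp only [PySem.Dict.ofList, PySem.Dict.update, List.foldl_cons, List.foldl_nil]
    by_cases h : v = 0
    · subst h; rw [PySem.Dict.get?_insert_self, if_pos rfl]
    · rw [PySem.Dict.get?_insert_of_ne _ _ h, if_neg h]
      simp [PySem.Dict.get?, PySem.Dict.empty]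
  have h0' : ((psl values)[0]?.getD 0 : Int) = 0 := h0
  rw [hof]
  by_cases hv : v = 0
  · subst hv
    simp [h0']
  · simp [h0', hv, Ne.symm hv]

-- the two Kadane-style first passes agree (values = v :: rest)
theorem S_peel (v : Int) (rest : List Int) :
    (rest.foldl (fun (p : Int × Int) x =>
        let me := max x (p.1 + x); (me, max p.2 me)) (v, v)).2
    = ((v :: rest).foldl (fun (p : Int × Int × Int) x =>
        let ps := p.1 + x
        let S := if ps - p.2.1 > p.2.2 then ps - p.2.1 else p.2.2
        let mn := if ps < p.2.1 then ps else p.2.1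
        (ps, mn, S)) (0, 0, v)).2.2 := by
  rw [List.foldl_cons]
  exact kadane_eq rest v v (0 + v) (if 0 + v < 0 then 0 + v else (0 : Int))
    (if 0 + v - 0 > v then 0 + v - 0 else v)
    (by split_ifs <;> omega) (by split_ifs <;> omega)

-- ===== VERDICT (by name: the statement is the Claim_ definition above) =====
theorem solve_row_spec : Claim_equal_solve_row := by
  intro values hdom hpre
  obtain ⟨v, rest, rfl⟩ := List.exists_cons_of_ne_nil hpre
  unfold Spec_solve_row
  simp only [solve_row, solve_row_alt, List.headD_cons, List.drop_succ_cons, List.drop_zero]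
  have hps : (v :: rest).foldl (fun acc x => acc ++ [acc.getLast?.getD 0 + x]) [0]
      = psl (v :: rest) := by
    have h := foldl_ps (v :: rest) [] 0
    simpa [psl] using h
  rw [hps]
  rw [S_peel v rest]
  rw [Aloop_eq (psl (v :: rest)) _ (v :: rest).length (by simp [psl, List.length_scanl])]
  rw [Bloop_eq (v :: rest) _ (v :: rest) 0 1 0 _ _ rfl (by norm_num)
    (by simp [psl, List.scanl_cons]) (inv0 _)]
  norm_num
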